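-- pv_equiv track=rewrite | github.com/FASD92/Algorithm | 프로그래머스/1/42862. 체육복/체육복.py | solution
-- ===== SOURCE A (Python) =====
-- def solution(n, lost, reserve):
--     real_lost = set(lost) - set(reserve)
--     real_reserve = set(reserve) - set(lost)
--
--     for student in sorted(real_lost):
--         if student - 1 in real_reserve:
--             real_reserve.remove(student - 1)
--         elif student + 1 in real_reserve:
--             real_reserve.remove(student + 1)
--         else:
--             n -= 1
--
--     return n
-- ===== SOURCE B (Python) =====
-- def solution(n, lost, reserve):
--     # Merge-style sweep: keep the spare holders as a queue sorted descending
--     # (so the smallest is at the end, popped in O(1)) and consume it while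
--     # visiting the truly-lost students in ascending order.
--     rs = sorted(set(reserve) - set(lost), reverse=True)
--     for s in sorted(set(lost) - set(reserve)):
--         while rs and rs[-1] < s - 1:
--             rs.pop()           # too small to help this or any later student
--         if rs and rs[-1] <= s + 1:
--             rs.pop()           # smallest usable spare: s-1 if present, else s+1
--         else:
--             n -= 1
--     return n
-- ===== Notes on version B (the rewrite author's own statement) =====
-- stated objective: alternative
-- what changed: A's greedy with repeated set-membership tests and set.remove on the reserve set is replaced by a merge-style sweep that sorts the spare holders once (descending, smallest at the end) and consumes them as a queue via O(1) pops while visiting the truly-lost students in ascending order.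
import Mathlib
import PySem

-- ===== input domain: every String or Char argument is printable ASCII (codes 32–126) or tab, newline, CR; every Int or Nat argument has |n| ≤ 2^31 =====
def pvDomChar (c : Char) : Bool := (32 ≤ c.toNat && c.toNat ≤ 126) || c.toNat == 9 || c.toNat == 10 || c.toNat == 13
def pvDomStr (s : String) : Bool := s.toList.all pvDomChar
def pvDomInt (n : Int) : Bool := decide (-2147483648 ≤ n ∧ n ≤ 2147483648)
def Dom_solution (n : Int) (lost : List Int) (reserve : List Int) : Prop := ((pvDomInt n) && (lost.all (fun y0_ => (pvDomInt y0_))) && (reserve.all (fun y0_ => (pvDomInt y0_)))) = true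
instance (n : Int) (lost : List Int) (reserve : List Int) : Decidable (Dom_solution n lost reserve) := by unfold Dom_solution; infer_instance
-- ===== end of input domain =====

-- B replaces A's repeated set-membership/removal greedy by a merge-style sweep that
-- consumes a sorted queue of spare holders left to right (objective: alternative);
-- B mutates only its own local list, not the arguments.

-- ===== PORT A =====
-- loop body: borrow from student-1, else student+1 (set.remove after the 'in'
-- check succeeds is exactly Set.discard), else lose one attendee
def solAFold (st : Int × PySem.Set Int) (s : Int) : Int × PySem.Set Int :=
  if PySem.Set.contains st.2 (s - 1) then (st.1, PySem.Set.discard st.2 (s - 1))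
  else if PySem.Set.contains st.2 (s + 1) then (st.1, PySem.Set.discard st.2 (s + 1))
  else (st.1 - 1, st.2)

def solution (n : Int) (lost : List Int) (reserve : List Int) : Int :=
  let realLost := PySem.Set.diff (PySem.Set.ofList lost) (PySem.Set.ofList reserve)
  let realReserve := PySem.Set.diff (PySem.Set.ofList reserve) (PySem.Set.ofList lost)
  ((PySem.List.sorted realLost (fun x => x) false).foldl solAFold (n, realReserve)).1

-- ===== PORT B =====
-- Python keeps the spare queue sorted DESCENDING and pops from its END; the port
-- represents that queue with its next element (Python's rs[-1]) FIRST, i.e. as the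
-- reverse of the Python list, so pop() is taking the tail.
-- the 'while rs and rs[-1] < s - 1: rs.pop()' loop
def skipSmall (s : Int) : List Int → List Int
  | [] => []
  | r :: rest => if r < s - 1 then skipSmall s rest else r :: rest

-- loop body over state (n, rs)
def solBStep (st : Int × List Int) (s : Int) : Int × List Int :=
  match skipSmall s st.2 with
  | [] => (st.1 - 1, [])
  | r :: rest => if r ≤ s + 1 then (st.1, rest) else (st.1 - 1, r :: rest)

def solution_alt (n : Int) (lost : List Int) (reserve : List Int) : Int :=
  let rs := (PySem.List.sorted (PySem.Set.diff (PySem.Set.ofList reserve) (PySem.Set.ofList lost)) (fun x => x) true).reverse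
  ((PySem.List.sorted (PySem.Set.diff (PySem.Set.ofList lost) (PySem.Set.ofList reserve)) (fun x => x) false).foldl solBStep (n, rs)).1

-- ===== PRECONDITION & SPEC =====
def Spec_solution (n : Int) (lost : List Int) (reserve : List Int) (out : Int) : Prop := out = solution_alt n lost reserve
instance (n : Int) (lost : List Int) (reserve : List Int) (out : Int) : Decidable (Spec_solution n lost reserve out) := by unfold Spec_solution; infer_instance

-- ===== CLAIM (what is proved, stated in full; the proofs are below) =====
def Claim_equal_solution : Prop := ∀ (n : Int) (lost : List Int) (reserve : List Int), Dom_solution n lost reserve → Spec_solution n lost reserve (solution n lost reserve)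

-- ===== LEMMAS AND PROOFS =====

-- invariant tying A's shrinking set R to B's queue rs while L remains to process:
-- both nodup/sorted, later students never in R, rs holds elements of R, and any
-- element of R already dropped from rs is too small to help any later student
def LoopInv (L R rs : List Int) : Prop :=
  R.Nodup ∧ rs.Pairwise (· < ·) ∧ L.Pairwise (· < ·) ∧
  (∀ s ∈ L, s ∉ R) ∧ (∀ x ∈ rs, x ∈ R) ∧
  (∀ x ∈ R, x ∉ rs → ∀ s ∈ L, x < s - 1)

theorem mem_skipSmall (s x : Int) (rs : List Int) (h : rs.Pairwise (· < ·)) :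
    x ∈ skipSmall s rs ↔ x ∈ rs ∧ s - 1 ≤ x := by
  induction rs with
  | nil => simp [skipSmall]
  | cons r rest ih =>
    rw [List.pairwise_cons] at h
    by_cases hr : r < s - 1
    · simp only [skipSmall, if_pos hr, ih h.2, List.mem_cons]
      constructor
      · exact fun ⟨hm, hle⟩ => ⟨Or.inr hm, hle⟩
      · rintro ⟨hm | hm, hle⟩
        · omega
        · exact ⟨hm, hle⟩
    · simp only [skipSmall, if_neg hr, List.mem_cons]
      constructor
      · rintro (rfl | hm)
        · exact ⟨Or.inl rfl, by omega⟩
        · exact ⟨Or.inr hm, by have := h.1 x hm; omega⟩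
      · exact fun ⟨hm, _⟩ => hm

theorem pairwise_skipSmall (s : Int) (rs : List Int) (h : rs.Pairwise (· < ·)) :
    (skipSmall s rs).Pairwise (· < ·) := by
  induction rs with
  | nil => exact h
  | cons r rest ih =>
    rw [List.pairwise_cons] at h
    by_cases hr : r < s - 1
    · simpa [skipSmall, hr] using ih h.2
    · simpa [skipSmall, hr] using List.Pairwise.cons h.1 h.2

-- one step keeps the first components equal and re-establishes the invariant
theorem step_agree (s n : Int) (L R rs : List Int) (hInv : LoopInv (s :: L) R rs) :
    (solAFold (n, R) s).1 = (solBStep (n, rs) s).1 ∧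
    LoopInv L (solAFold (n, R) s).2 (solBStep (n, rs) s).2 := by
  obtain ⟨hRnd, hrs, hL, hdisj, hsub, hdrop⟩ := hInv
  rw [List.pairwise_cons] at hL
  have hsR : s ∉ R := hdisj s (by simp)
  have hmem : ∀ x, s - 1 ≤ x → (x ∈ R ↔ x ∈ skipSmall s rs) := by
    intro x hx
    rw [mem_skipSmall s x rs hrs]
    refine ⟨fun hxR => ⟨?_, hx⟩, fun h => hsub x h.1⟩
    by_contra hxrs
    have := hdrop x hxR hxrs s (by simp)
    omega
  have hsk := pairwise_skipSmall s rs hrs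
  have hdrop' : ∀ x ∈ R, x ∉ skipSmall s rs → ∀ t ∈ L, x < t - 1 := by
    intro x hxR hxsk t htL
    have hst := hL.1 t htL
    by_cases hxrs : x ∈ rs
    · have : ¬ (s - 1 ≤ x) := fun h => hxsk ((mem_skipSmall s x rs hrs).2 ⟨hxrs, h⟩)
      omega
    · have := hdrop x hxR hxrs s (by simp); omega
  have hLrest : ∀ t ∈ L, t ∉ R := fun t ht => hdisj t (List.mem_cons_of_mem s ht)
  cases hcase : skipSmall s rs with
  | nil =>
    have h1 : s - 1 ∉ R := fun h => by
      have := (hmem (s - 1) (by omega)).1 h; rw [hcase] at this; cases this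
    have h2 : s + 1 ∉ R := fun h => by
      have := (hmem (s + 1) (by omega)).1 h; rw [hcase] at this; cases this
    simp only [solAFold, solBStep, hcase]
    rw [if_neg (by simpa [PySem.Set.contains_iff] using h1),
        if_neg (by simpa [PySem.Set.contains_iff] using h2)]
    refine ⟨rfl, hRnd, List.Pairwise.nil, hL.2, hLrest, by simp, ?_⟩
    intro x hxR _ t htL
    exact hdrop' x hxR (by rw [hcase]; simp) t htL
  | cons r rest =>
    have hsk' := hcase ▸ hsk
    rw [List.pairwise_cons] at hsk'
    have hmemsk : ∀ x, x ∈ r :: rest ↔ x ∈ rs ∧ s - 1 ≤ x := by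
      intro x; rw [← hcase]; exact mem_skipSmall s x rs hrs
    have hrR : r ∈ R := hsub r ((hmemsk r).1 (by simp)).1
    have hrge : s - 1 ≤ r := ((hmemsk r).1 (by simp)).2
    have hrne : r ≠ s := fun h => hsR (h ▸ hrR)
    have hrestR : ∀ x ∈ rest, x ∈ R ∧ r < x := fun x hx =>
      ⟨hsub x ((hmemsk x).1 (by simp [hx])).1, hsk'.1 x hx⟩
    have hdropNew : ∀ (v : Int), (∀ x ∈ R, x ≠ v → x ∉ r :: rest → ∀ t ∈ L, x < t - 1) := by
      intro v x hxR _ hxn t htL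
      exact hdrop' x hxR (by rw [hcase]; exact hxn) t htL
    by_cases hle : r ≤ s + 1
    · -- a lend happens; r is s-1 or s+1, exactly A's preferred choice
      have hcases : r = s - 1 ∨ r = s + 1 := by omega
      rcases hcases with rfl | rfl
      · -- r = s - 1 : A's first branch fires
        simp only [solAFold, solBStep, hcase]
        rw [if_pos (by simpa [PySem.Set.contains_iff] using hrR), if_pos hle]
        refine ⟨rfl, PySem.Set.nodup_discard _ _ hRnd, hsk'.2, hL.2, ?_, ?_, ?_⟩
        · intro t ht hmem'
          exact hLrest t ht ((PySem.Set.mem_discard _ _ _).1 hmem').1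
        · intro x hx
          obtain ⟨hxR, hlt⟩ := hrestR x hx
          exact (PySem.Set.mem_discard _ _ _).2 ⟨hxR, by omega⟩
        · intro x hx hxrest t htL
          obtain ⟨hxR, hxne⟩ := (PySem.Set.mem_discard _ _ _).1 hx
          exact hdropNew (s-1) x hxR hxne (by simp [hxne, hxrest]) t htL
      · -- r = s + 1 : s - 1 is not in R, so A's second branch fires
        have h1 : s - 1 ∉ R := by
          intro hv
          have := (hmem (s - 1) (by omega)).1 hv
          rw [hcase] at this
          rcases List.mem_cons.1 this with h | h
          · omega
          · have := (hrestR _ h).2; omega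
        simp only [solAFold, solBStep, hcase]
        rw [if_neg (by simpa [PySem.Set.contains_iff] using h1),
            if_pos (by simpa [PySem.Set.contains_iff] using hrR), if_pos hle]
        refine ⟨rfl, PySem.Set.nodup_discard _ _ hRnd, hsk'.2, hL.2, ?_, ?_, ?_⟩
        · intro t ht hmem'
          exact hLrest t ht ((PySem.Set.mem_discard _ _ _).1 hmem').1
        · intro x hx
          obtain ⟨hxR, hlt⟩ := hrestR x hx
          exact (PySem.Set.mem_discard _ _ _).2 ⟨hxR, by omega⟩
        · intro x hx hxrest t htL
          obtain ⟨hxR, hxne⟩ := (PySem.Set.mem_discard _ _ _).1 hx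
          exact hdropNew (s+1) x hxR hxne (by simp [hxne, hxrest]) t htL
    · -- queue head beyond s + 1 : nobody can lend, s-1 and s+1 are absent
      have hnot : ∀ v, s - 1 ≤ v → v ≤ s + 1 → v ∉ R := by
        intro v h1 h2 hv
        have := (hmem v h1).1 hv
        rw [hcase] at this
        rcases List.mem_cons.1 this with h | h
        · omega
        · have := (hrestR v h).2; omega
      have h1 : s - 1 ∉ R := hnot (s - 1) (by omega) (by omega)
      have h2 : s + 1 ∉ R := hnot (s + 1) (by omega) (by omega)
      simp only [solAFold, solBStep, hcase]
      rw [if_neg (by simpa [PySem.Set.contains_iff] using h1),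
          if_neg (by simpa [PySem.Set.contains_iff] using h2), if_neg hle]
      refine ⟨rfl, hRnd, hcase ▸ hsk, hL.2, hLrest, ?_, ?_⟩
      · exact fun x hx => hsub x ((hmemsk x).1 hx).1
      · intro x hxR hxn t htL
        exact hdrop' x hxR (by rw [hcase]; exact hxn) t htL

theorem foldl_agree (L : List Int) : ∀ (n : Int) (R rs : List Int), LoopInv L R rs →
    (L.foldl solAFold (n, R)).1 = (L.foldl solBStep (n, rs)).1 := by
  induction L with
  | nil => intro n R rs _; rfl
  | cons s L ih =>
    intro n R rs hInv
    obtain ⟨heq, hInv'⟩ := step_agree s n L R rs hInv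
    have h1 := ih (solAFold (n, R) s).1 (solAFold (n, R) s).2 (solBStep (n, rs) s).2 hInv'
    calc (List.foldl solAFold (solAFold (n, R) s) L).1
        = (List.foldl solAFold ((solAFold (n, R) s).1, (solAFold (n, R) s).2) L).1 := rfl
      _ = (List.foldl solBStep ((solBStep (n, rs) s).1, (solBStep (n, rs) s).2) L).1 := by
            rw [← heq]; exact h1
      _ = (List.foldl solBStep (solBStep (n, rs) s) L).1 := rfl

-- sorted(set-difference) is strictly increasing
theorem pairwise_lt_sorted_of_nodup (l : List Int) (h : l.Nodup) :
    (PySem.List.sorted l (fun x => x) false).Pairwise (· < ·) := by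
  have hle := PySem.List.sorted_pairwise (xs := l) (key := fun x => x)
  have hnd : (PySem.List.sorted l (fun x => x) false).Nodup :=
    ((PySem.List.sorted_perm l (fun x => x) false).symm.nodup h)
  exact (hle.and hnd).imp (fun h => lt_of_le_of_ne h.1 h.2)

-- a descending sort read backwards is the ascending sort (distinct elements)
theorem reverse_sorted_desc (l : List Int) (h : l.Nodup) :
    (PySem.List.sorted l (fun x => x) true).reverse = PySem.List.sorted l (fun x => x) false := by
  refine (PySem.List.sorted_eq_of_perm_of_pairwise_lt l _ (fun x => x) ?_ ?_).symm
  · exact ((PySem.List.sorted l (fun x => x) true).reverse_perm).trans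
      (PySem.List.sorted_perm l (fun x => x) true)
  · have hge := PySem.List.sorted_pairwise_rev (xs := l) (key := fun x => x)
    have hnd : (PySem.List.sorted l (fun x => x) true).reverse.Nodup :=
      List.nodup_reverse.2 ((PySem.List.sorted_perm l (fun x => x) true).symm.nodup h)
    have hle : (PySem.List.sorted l (fun x => x) true).reverse.Pairwise (· ≤ ·) :=
      (List.pairwise_reverse.2 hge)
    exact (hle.and hnd).imp (fun h => lt_of_le_of_ne h.1 h.2)

theorem initial_inv (lost reserve : List Int) :
    LoopInv (PySem.List.sorted (PySem.Set.diff (PySem.Set.ofList lost) (PySem.Set.ofList reserve)) (fun x => x) false)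
        (PySem.Set.diff (PySem.Set.ofList reserve) (PySem.Set.ofList lost))
        (PySem.List.sorted (PySem.Set.diff (PySem.Set.ofList reserve) (PySem.Set.ofList lost)) (fun x => x) false) := by
  have hRnd : (PySem.Set.diff (PySem.Set.ofList reserve) (PySem.Set.ofList lost)).Nodup :=
    PySem.Set.nodup_diff _ _ (PySem.Set.nodup_ofList reserve)
  have hLnd : (PySem.Set.diff (PySem.Set.ofList lost) (PySem.Set.ofList reserve)).Nodup :=
    PySem.Set.nodup_diff _ _ (PySem.Set.nodup_ofList lost)
  refine ⟨hRnd, pairwise_lt_sorted_of_nodup _ hRnd, pairwise_lt_sorted_of_nodup _ hLnd, ?_, ?_, ?_⟩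
  · intro s hs hsR
    rw [PySem.List.mem_sorted, PySem.Set.mem_diff, PySem.Set.mem_ofList, PySem.Set.mem_ofList] at hs
    rw [PySem.Set.mem_diff, PySem.Set.mem_ofList, PySem.Set.mem_ofList] at hsR
    exact hsR.2 hs.1
  · intro x hx; rwa [PySem.List.mem_sorted] at hx
  · intro x hx hxs t htL
    exfalso; apply hxs; rw [PySem.List.mem_sorted]; exact hx

-- ===== VERDICT (by name: the statement is the Claim_ definition above) =====
theorem solution_spec : Claim_equal_solution := by
  intro n lost reserve _
  show solution n lost reserve = solution_alt n lost reserve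
  simp only [solution, solution_alt]
  rw [reverse_sorted_desc _ (PySem.Set.nodup_diff _ _ (PySem.Set.nodup_ofList reserve))]
  exact foldl_agree _ n _ _ (initial_inv lost reserve)
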